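-- pv_equiv track=rewrite | github.com/Mqlvin/brain-bites | video/webvtt.py | iter_tags
-- ===== SOURCE A (Python) =====
-- def iter_tags(string):
--     block = ""
--     tag_depth = 0
--     new_tag_depth = 0
--     depth_changed = False
--     for char in string:
--         # Where a tag is something like <c> </c> etc
--         if char == "<":
--             # Start of a tag
--             depth_changed = True
--             new_tag_depth = tag_depth + 1
--         elif char == ">":
--             # End of a tag
--             depth_changed = True
--             new_tag_depth = tag_depth - 1
--         else:
--             block += char
--
--         if depth_changed:
--             if block != "":
--                 yield block, tag_depth
--             depth_changed = False
--             block = ""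
--             tag_depth = new_tag_depth
--     # If depth is constant e.g. no tags, make sure that something is still yielded
--     yield block, tag_depth
-- ===== SOURCE B (Python) =====
-- def iter_tags(string):
--     depth = 0
--     rest = string
--     while True:
--         k = next((i for i, c in enumerate(rest) if c in "<>"), -1)
--         if k == -1:
--             yield rest, depth
--             return
--         if k > 0:
--             yield rest[:k], depth
--         depth += 1 if rest[k] == "<" else -1
--         rest = rest[k + 1:]
-- ===== Notes on version B (the rewrite author's own statement) =====
-- stated objective: simpler
-- what changed: A's per-character generator with block/depth_changed/new_tag_depth state is replaced by a scan that jumps to the next '<' or '>' and yields whole slices, keeping only a depth counter and the remaining string.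
import Mathlib
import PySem

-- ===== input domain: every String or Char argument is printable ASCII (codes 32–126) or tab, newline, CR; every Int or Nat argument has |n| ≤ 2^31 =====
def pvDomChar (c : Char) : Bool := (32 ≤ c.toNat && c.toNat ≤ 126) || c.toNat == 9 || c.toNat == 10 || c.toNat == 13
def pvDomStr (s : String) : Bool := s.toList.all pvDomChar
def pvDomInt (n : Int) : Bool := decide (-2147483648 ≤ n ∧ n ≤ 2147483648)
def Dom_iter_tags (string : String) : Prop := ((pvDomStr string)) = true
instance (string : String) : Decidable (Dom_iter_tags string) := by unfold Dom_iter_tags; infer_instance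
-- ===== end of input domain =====

-- B replaces A's per-character state machine by a jump-to-next-bracket scan with slices; objective: simpler.

-- ===== PORT A =====
-- the body of A's for-loop; state = (block, tag_depth, new_tag_depth, depth_changed, out)
-- (block is carried as List Char; Python's str concatenation `block += char` is `block ++ [char]`,
--  and `block != ""` is `block ≠ []`; the yielded str is String.mk block)
def iter_tags_step (st : List Char × Int × Int × Bool × List (String × Int)) (char : Char) :
    List Char × Int × Int × Bool × List (String × Int) :=
  let block := st.1
  let tag_depth := st.2.1
  let new_tag_depth := st.2.2.1
  let depth_changed := st.2.2.2.1
  let out := st.2.2.2.2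
  let (block, new_tag_depth, depth_changed) :=
    if char = '<' then (block, tag_depth + 1, true)
    else if char = '>' then (block, tag_depth - 1, true)
    else (block ++ [char], new_tag_depth, depth_changed)
  if depth_changed then
    (([] : List Char), new_tag_depth, new_tag_depth, false,
      out ++ (if block ≠ [] then [(String.mk block, tag_depth)] else []))
  else
    (block, tag_depth, new_tag_depth, depth_changed, out)

def iter_tags (string : String) : List (String × Int) :=
  let st := string.toList.foldl iter_tags_step ([], 0, 0, false, [])
  -- final unconditional yield
  st.2.2.2.2 ++ [(String.mk st.1, st.2.1)]

-- ===== PORT B =====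
def pvBracket (c : Char) : Bool := c = '<' || c = '>'

-- B's while-loop: find the index k of the next bracket; none → final yield of the rest;
-- some k → yield the slice before it when non-empty, adjust depth, continue after it.
def iter_tags_alt_go (rest : List Char) (depth : Int) : List (String × Int) :=
  match h : rest.findIdx? pvBracket with
  | none => [(String.mk rest, depth)]
  | some k =>
    (if k > 0 then [(String.mk (rest.take k), depth)] else []) ++
      iter_tags_alt_go (rest.drop (k + 1))
        (if rest.getD k ' ' = '<' then depth + 1 else depth - 1)
termination_by rest.length
decreasing_by
  have hk : k < rest.length := (List.findIdx?_eq_some_iff_findIdx_eq.mp h).1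
  simp [List.length_drop]; omega

def iter_tags_alt (string : String) : List (String × Int) :=
  iter_tags_alt_go string.toList 0

-- ===== PRECONDITION & SPEC =====
def Spec_iter_tags (string : String) (out : List (String × Int)) : Prop := out = iter_tags_alt string
instance (string : String) (out : List (String × Int)) : Decidable (Spec_iter_tags string out) := by unfold Spec_iter_tags; infer_instance

-- ===== CLAIM (what is proved, stated in full; the proofs are below) =====
def Claim_equal_iter_tags : Prop := ∀ (string : String), Dom_iter_tags string → Spec_iter_tags string (iter_tags string)

-- ===== LEMMAS AND PROOFS =====

-- one step of B's scan, with a pending block prefix carried from A's side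
def pvH (block : List Char) (d : Int) (cs : List Char) : List (String × Int) :=
  match cs.findIdx? pvBracket with
  | none => [(String.mk (block ++ cs), d)]
  | some k =>
    (if block ++ cs.take k = [] then [] else [(String.mk (block ++ cs.take k), d)]) ++
      iter_tags_alt_go (cs.drop (k + 1)) (if cs.getD k ' ' = '<' then d + 1 else d - 1)

-- A's finisher applied to a fold state
def pvFin (st : List Char × Int × Int × Bool × List (String × Int)) : List (String × Int) :=
  st.2.2.2.2 ++ [(String.mk st.1, st.2.1)]

lemma pvH_nil (d : Int) (cs : List Char) : pvH [] d cs = iter_tags_alt_go cs d := by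
  rw [iter_tags_alt_go, pvH]
  cases h : cs.findIdx? pvBracket with
  | none => rfl
  | some k =>
    have hk : k < cs.length := (List.findIdx?_eq_some_iff_findIdx_eq.mp h).1
    have hne : cs ≠ [] := by rintro rfl; simp at hk
    simp only [List.nil_append, List.take_eq_nil_iff, hne, or_false]
    cases k with
    | zero => simp
    | succ n => simp

lemma pvStep_lt (block : List Char) (d : Int) (out : List (String × Int)) :
    iter_tags_step (block, d, d, false, out) '<' =
      ([], d + 1, d + 1, false, out ++ (if block ≠ [] then [(String.mk block, d)] else [])) := by
  simp [iter_tags_step]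

lemma pvStep_gt (block : List Char) (d : Int) (out : List (String × Int)) :
    iter_tags_step (block, d, d, false, out) '>' =
      ([], d - 1, d - 1, false, out ++ (if block ≠ [] then [(String.mk block, d)] else [])) := by
  simp [iter_tags_step]

lemma pvStep_other (block : List Char) (d : Int) (out : List (String × Int)) (c : Char)
    (h1 : ¬ c = '<') (h2 : ¬ c = '>') :
    iter_tags_step (block, d, d, false, out) c = (block ++ [c], d, d, false, out) := by
  simp [iter_tags_step, h1, h2]

lemma pvMain (cs : List Char) : ∀ (block : List Char) (d : Int) (out : List (String × Int)),
    pvFin (cs.foldl iter_tags_step (block, d, d, false, out)) = out ++ pvH block d cs := by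
  induction cs with
  | nil => intro block d out; simp [pvFin, pvH]
  | cons c cs ih =>
    intro block d out
    by_cases h1 : c = '<'
    · subst h1
      rw [List.foldl_cons, pvStep_lt, ih, pvH_nil, pvH]
      simp only [List.findIdx?_cons]
      norm_num [pvBracket, pvH]
    · by_cases h2 : c = '>'
      · subst h2
        rw [List.foldl_cons, pvStep_gt, ih, pvH_nil, pvH]
        simp only [List.findIdx?_cons]
        norm_num [pvBracket, pvH]
        simp
      · rw [List.foldl_cons, pvStep_other _ _ _ _ h1 h2, ih]
        -- pvH (block ++ [c]) d cs = pvH block d (c :: cs)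
        rw [pvH, pvH]
        simp only [List.findIdx?_cons, pvBracket, h1, h2]
        norm_num
        cases hf : cs.findIdx? pvBracket with
        | none => simp
        | some k =>
          simp only [Option.map_some]
          simp only [List.take_succ_cons, List.getElem?_cons_succ,
            List.cons_ne_nil, and_false, Nat.succ_ne_zero, false_or, List.cons_append,
            if_false]
          rfl

-- ===== VERDICT (by name: the statement is the Claim_ definition above) =====
theorem iter_tags_spec : Claim_equal_iter_tags := by
  intro s _
  show iter_tags s = iter_tags_alt s
  rw [iter_tags, iter_tags_alt]
  have := pvMain s.toList [] 0 []
  rw [pvH_nil] at this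
  simpa [pvFin] using this
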